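-- pv_equiv track=rewrite | github.com/Gyoorey/aoc_2025 | day14/sol.py | has_big_area
-- ===== SOURCE A (Python) =====
-- def has_big_area(result_map,  threshold=10):
--     def longest_run_in_row(row):
--         max_run = 0
--         current_run = 0
--         for cell in row:
--             if cell > 0:
--                 current_run += 1
--                 max_run = max(max_run, current_run)
--             else:
--                 current_run = 0
--         return max_run
--
--     threshold = 10
--     for row in result_map:
--         if longest_run_in_row(row) > threshold:
--             return True
--     return False
-- ===== SOURCE B (Python) =====
-- def has_big_area(result_map, threshold=10):
--     # The original hardcodes threshold = 10, i.e. looks for 11 consecutive positive cells.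
--     K = 11
--     for row in result_map:
--         n = len(row)
--         for i in range(n - K + 1):
--             if all(c > 0 for c in row[i:i+K]):
--                 return True
--     return False
-- ===== Notes on version B (the rewrite author's own statement) =====
-- stated objective: alternative
-- what changed: Replaces the running-max run-length scan with a sliding-window check: a row qualifies iff some window of 11 consecutive cells is all positive; the hardcoded threshold-10 override is kept.
import Mathlib
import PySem

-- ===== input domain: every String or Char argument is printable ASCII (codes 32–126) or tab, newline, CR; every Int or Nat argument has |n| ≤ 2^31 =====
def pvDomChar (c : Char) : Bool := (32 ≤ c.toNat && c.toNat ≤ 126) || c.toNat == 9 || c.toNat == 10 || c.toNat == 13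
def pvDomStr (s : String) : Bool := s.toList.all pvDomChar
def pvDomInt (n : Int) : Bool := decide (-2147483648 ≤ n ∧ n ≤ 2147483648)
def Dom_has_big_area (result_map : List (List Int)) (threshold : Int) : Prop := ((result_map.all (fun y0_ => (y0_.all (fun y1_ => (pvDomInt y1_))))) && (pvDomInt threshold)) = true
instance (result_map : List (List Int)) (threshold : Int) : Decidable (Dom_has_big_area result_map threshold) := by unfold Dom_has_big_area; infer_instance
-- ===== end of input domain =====

-- B replaces A's running-max run-length scan with a sliding-window check (any 11 consecutive cells all positive); same result, similar cost.

-- ===== PORT A =====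
-- fold step for the inner `for cell in row` loop: state = (max_run, current_run)
def lrStep (s : Int × Int) (cell : Int) : Int × Int :=
  if 0 < cell then (max s.1 (s.2 + 1), s.2 + 1) else (s.1, 0)

def longest_run_in_row (row : List Int) : Int :=
  (row.foldl lrStep (0, 0)).1

-- the outer loop with early return
def hbaLoop : List (List Int) → Bool
  | [] => false
  | r :: rs => if longest_run_in_row r > 10 then true else hbaLoop rs

def has_big_area (result_map : List (List Int)) (threshold : Int) : Bool :=
  -- A reassigns threshold = 10, so the parameter is ignored
  hbaLoop result_map

-- ===== PORT B =====
-- cell > 0 test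
def pos (c : Int) : Bool := decide (0 < c)

-- inner while loop: slide the window start over the row's suffixes
def winScan : List Int → Bool
  | [] => false
  | x :: xs =>
    if 11 ≤ (x :: xs).length then
      ((x :: xs).take 11).all pos || winScan xs
    else false

def has_big_area_alt (result_map : List (List Int)) (threshold : Int) : Bool :=
  result_map.any winScan

-- ===== PRECONDITION & SPEC =====
def Spec_has_big_area (result_map : List (List Int)) (threshold : Int) (out : Bool) : Prop := out = has_big_area_alt result_map threshold
instance (result_map : List (List Int)) (threshold : Int) (out : Bool) : Decidable (Spec_has_big_area result_map threshold out) := by unfold Spec_has_big_area; infer_instance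

-- ===== CLAIM (what is proved, stated in full; the proofs are below) =====
def Claim_equal_has_big_area : Prop := ∀ (result_map : List (List Int)) (threshold : Int), Dom_has_big_area result_map threshold → Spec_has_big_area result_map threshold (has_big_area result_map threshold)

-- ===== LEMMAS AND PROOFS =====

-- "current run reaches length 11" predicate mirroring the fold's counter
def reach (c : Int) : List Int → Bool
  | [] => false
  | x :: xs => if 0 < x then decide (10 < c + 1) || reach (c + 1) xs else reach 0 xs

theorem foldl_lrStep_gt (row : List Int) (m c : Int) :
    10 < (row.foldl lrStep (m, c)).1 ↔ (10 < m ∨ reach c row = true) := by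
  induction row generalizing m c with
  | nil => simp [reach]
  | cons x xs ih =>
    by_cases hx : 0 < x
    · simp only [List.foldl_cons, lrStep, hx, if_pos, reach]
      rw [ih]
      simp only [lt_max_iff, Bool.or_eq_true, decide_eq_true_iff]
      tauto
    · rw [List.foldl_cons, show lrStep (m, c) x = (m, 0) from by simp [lrStep, hx],
        show reach c (x :: xs) = reach 0 xs from by simp [reach, hx]]
      exact ih m 0

theorem winScan_short (l : List Int) (h : l.length < 11) : winScan l = false := by
  cases l with
  | nil => rfl
  | cons x xs =>
    have h2 : ¬ 11 ≤ (x :: xs).length := by omega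
    rw [winScan, if_neg h2]

theorem winScan_cons (x : Int) (xs : List Int) :
    winScan (x :: xs) =
      ((decide (11 ≤ (x :: xs).length) && ((x :: xs).take 11).all pos) || winScan xs) := by
  by_cases h : 11 ≤ (x :: xs).length
  · rw [winScan, if_pos h]
    have hd : decide (11 ≤ (x :: xs).length) = true := by simpa using h
    rw [hd, Bool.true_and]
  · rw [winScan, if_neg h]
    have hd : decide (11 ≤ (x :: xs).length) = false := by simpa using h
    rw [hd, Bool.false_and, Bool.false_or, winScan_short xs (by simp at h; omega)]

theorem all_take_mono (l : List Int) (k m : Nat) (hk : k ≤ m)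
    (h : (l.take m).all pos = true) : (l.take k).all pos = true := by
  simp only [List.all_eq_true] at h ⊢
  intro x hx
  have hx2 : x ∈ (l.take m).take k := by
    rw [List.take_take, Nat.min_eq_left hk]; exact hx
  exact h x (List.take_subset k (l.take m) hx2)

theorem winScan_of_prefix (xs : List Int)
    (h : (decide (11 ≤ xs.length) && (xs.take 11).all pos) = true) :
    winScan xs = true := by
  cases xs with
  | nil => simp at h
  | cons y ys =>
    simp only [Bool.and_eq_true, decide_eq_true_iff] at h
    rw [winScan, if_pos h.1, h.2, Bool.true_or]

theorem reach_eq (row : List Int) : ∀ (n : Nat), 1 ≤ n → n ≤ 11 →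
    reach (11 - (n : Int)) row =
      ((decide (n ≤ row.length) && (row.take n).all pos) || winScan row) := by
  induction row with
  | nil =>
    intro n h1 _
    have hd : decide (n ≤ List.length ([] : List Int)) = false := by simp; omega
    rw [reach, winScan, hd, Bool.false_and, Bool.false_or]
  | cons x xs ih =>
    intro n h1 h11
    by_cases hx : 0 < x
    · rcases Nat.eq_or_lt_of_le h1 with h | h
      · -- n = 1: the run completes right here
        have hn : n = 1 := h.symm
        subst hn
        rw [reach, if_pos hx]
        have hd : decide (10 < (11 : Int) - (1 : Nat) + 1) = true := by norm_num
        rw [hd, Bool.true_or]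
        have h1' : decide ((1 : Nat) ≤ (x :: xs).length) = true := by simp
        have h2' : ((x :: xs).take 1).all pos = true := by simp [pos, hx]
        rw [h1', h2', Bool.true_and, Bool.true_or]
      · -- 2 ≤ n: consume one positive cell
        have hd : decide (10 < (11 : Int) - (n : Int) + 1) = false := by
          simp only [decide_eq_false_iff_not]; omega
        have stepc : (11 : Int) - (n : Int) + 1 = 11 - ((n - 1 : Nat) : Int) := by
          push_cast [Nat.cast_sub (by omega : 1 ≤ n)]; ring
        rw [reach, if_pos hx, hd, Bool.false_or, stepc, ih (n - 1) (by omega) (by omega),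
          winScan_cons]
        have htn : ((x :: xs).take n).all pos = (xs.take (n - 1)).all pos := by
          cases n with
          | zero => omega
          | succ m => simp [List.take_succ_cons, pos, hx]
        have ht11 : ((x :: xs).take 11).all pos = (xs.take 10).all pos := by
          simp [List.take_succ_cons, pos, hx]
        have hlen : (decide (n ≤ (x :: xs).length)) = (decide (n - 1 ≤ xs.length)) := by
          simp only [List.length_cons, decide_eq_decide]; omega
        rw [htn, ht11, hlen]
        -- absorption: an 11-window starting here implies the (n-1)-prefix condition
        cases hW : (decide (11 ≤ (x :: xs).length) && (xs.take 10).all pos) with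
        | false => rw [Bool.false_or]
        | true =>
          have hW2 := hW
          simp only [Bool.and_eq_true, decide_eq_true_iff, List.length_cons] at hW2
          have h1' : (xs.take (n - 1)).all pos = true :=
            all_take_mono xs (n - 1) 10 (by omega) hW2.2
          have h2' : (decide (n - 1 ≤ xs.length)) = true := by simp; omega
          rw [h1', h2']
          simp
    · -- x ≤ 0: current run resets; any window through x is dead too
      have hr0 : reach (11 - (n : Int)) (x :: xs) = reach (11 - ((11 : Nat) : Int)) xs := by
        rw [reach, if_neg hx]; norm_num
      rw [hr0, ih 11 (by omega) (by omega), winScan_cons]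
      have htn : ((x :: xs).take n).all pos = false := by
        cases n with
        | zero => omega
        | succ m =>
          simp only [List.take_succ_cons, List.all_cons, pos, Bool.and_eq_false_iff]
          left; simp; omega
      have ht11 : ((x :: xs).take 11).all pos = false := by
        simp only [List.take_succ_cons, List.all_cons, pos, Bool.and_eq_false_iff]
        left; simp; omega
      rw [htn, ht11, Bool.and_false, Bool.and_false, Bool.false_or, Bool.false_or]
      -- absorption: the kept xs 11-prefix disjunct is subsumed by winScan xs
      cases hW : (decide (11 ≤ xs.length) && (xs.take 11).all pos) with
      | false => rw [Bool.false_or]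
      | true => rw [Bool.true_or, winScan_of_prefix xs hW]

theorem row_eq (row : List Int) : (longest_run_in_row row > 10) ↔ winScan row = true := by
  unfold longest_run_in_row
  rw [gt_iff_lt, foldl_lrStep_gt]
  have hr0 : reach (0 : Int) row = reach (11 - ((11 : Nat) : Int)) row := by norm_num
  rw [hr0, reach_eq row 11 (by omega) (by omega)]
  constructor
  · rintro (h | h)
    · omega
    · rcases Bool.or_eq_true _ _ |>.mp h with h' | h'
      · exact winScan_of_prefix row h'
      · exact h'
  · intro h
    right
    rw [h, Bool.or_true]

theorem hbaLoop_eq (rm : List (List Int)) : hbaLoop rm = rm.any winScan := by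
  induction rm with
  | nil => rfl
  | cons r rs ih =>
    rw [hbaLoop, List.any_cons, ← ih]
    by_cases h : longest_run_in_row r > 10
    · have hw : winScan r = true := (row_eq r).mp h
      simp [h, hw]
    · have hw : winScan r = false := by
        cases hw : winScan r
        · rfl
        · exact absurd ((row_eq r).mpr hw) h
      simp [h, hw]

-- ===== VERDICT (by name: the statement is the Claim_ definition above) =====
theorem has_big_area_spec : Claim_equal_has_big_area := by
  intro rm t _
  show has_big_area rm t = has_big_area_alt rm t
  unfold has_big_area has_big_area_alt
  exact hbaLoop_eq rm
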